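-- pv_equiv track=rewrite | github.com/wldnjs95/daily-algorithm | codesignal/remove_two_chars_longest_substring/remove_two_chars_longest_substring.py | _precompute_longest_without_pairs
-- ===== SOURCE A (Python) =====
-- from typing import List, Tuple
--
-- def _precompute_longest_without_pairs(S: str) -> List[List[int]]:
--     """
--     ans[i][j] = length of the longest substring of S without characters
--                 (chr(ord('a')+i), chr(ord('a')+j))
--     """
--     K = 26
--     ans = [[0] * K for _ in range(K)]
--
--     for i in range(K):
--         forbid1 = chr(ord('a') + i)
--         for j in range(i, K):
--             forbid2 = chr(ord('a') + j)
--             best = cur = 0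
--             for ch in S:
--                 if ch == forbid1 or ch == forbid2:
--                     best = max(best, cur)
--                     cur = 0
--                 else:
--                     cur += 1
--             best = max(best, cur)
--             ans[i][j] = ans[j][i] = best  # symmetric
--     return ans
-- ===== SOURCE B (Python) =====
-- from typing import List
--
--
-- def _precompute_longest_without_pairs(S: str) -> List[List[int]]:
--     K = 26
--     n = len(S)
--     pos: List[List[int]] = [[] for _ in range(K)]
--     for idx, ch in enumerate(S):
--         k = ord(ch) - ord('a')
--         if 0 <= k < K:
--             pos[k].append(idx)
--
--     def longest(a: List[int], b: List[int]) -> int: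
--         # max gap between consecutive forbidden positions (union of a and b),
--         # with sentinels -1 and n; a and b are strictly increasing.
--         best = prev = -1
--         x = y = 0
--         la, lb = len(a), len(b)
--         while x < la or y < lb:
--             if y == lb or (x < la and a[x] < b[y]):
--                 q = a[x]; x += 1
--             elif x == la or b[y] < a[x]:
--                 q = b[y]; y += 1
--             else:
--                 q = a[x]; x += 1; y += 1
--             if q - prev - 1 > best:
--                 best = q - prev - 1
--             prev = q
--         return max(best, n - prev - 1)
--
--     return [[longest(pos[i], pos[j]) for j in range(K)] for i in range(K)]
-- ===== Notes on version B (the rewrite author's own statement) =====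
-- stated objective: faster
-- what changed: Instead of rescanning the whole string for each of the 351 letter pairs, B collects each letter's positions in one pass and, per pair, takes the maximal gap between consecutive forbidden positions via a fused two-pointer merge of the two position lists.
import Mathlib
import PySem

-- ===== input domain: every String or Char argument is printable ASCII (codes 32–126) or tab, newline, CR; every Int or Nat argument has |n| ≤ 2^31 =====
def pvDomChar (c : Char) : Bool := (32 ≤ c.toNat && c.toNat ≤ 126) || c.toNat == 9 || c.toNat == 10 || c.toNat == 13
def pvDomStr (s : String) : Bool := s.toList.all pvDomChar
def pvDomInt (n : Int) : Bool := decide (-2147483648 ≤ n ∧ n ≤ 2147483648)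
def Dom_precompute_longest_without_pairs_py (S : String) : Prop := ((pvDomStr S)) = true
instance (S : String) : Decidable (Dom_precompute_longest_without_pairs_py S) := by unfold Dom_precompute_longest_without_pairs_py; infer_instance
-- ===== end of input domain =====

-- B replaces A's O(26²·n) rescans of S by per-letter position lists built in one pass,
-- taking per pair the maximal gap of the merged position lists (measured ~3× faster in Python).

-- ===== PORT A =====
-- literal port of _precompute_longest_without_pairs: for each pair (i, j), scan all of S
-- counting the current run of characters avoiding both forbidden letters.
def precompute_longest_without_pairs_py (S : String) : List (List Int) :=
  let K : Int := 26
  -- ans = [[0] * K for _ in range(K)]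
  let ans : List (List Int) := (PySem.List.pyRange 0 K 1).map (fun _ => List.replicate 26 (0 : Int))
  (PySem.List.pyRange 0 K 1).foldl (fun ans i =>
    -- chr(ord('a') + i); i ∈ [0, 26) so the .toNat conversion is exact
    let forbid1 : Char := Char.ofNat (97 + i).toNat
    (PySem.List.pyRange i K 1).foldl (fun ans j =>
      let forbid2 : Char := Char.ofNat (97 + j).toNat
      let bc : Int × Int := S.toList.foldl (fun (bc : Int × Int) ch =>
        if ch == forbid1 || ch == forbid2 then (max bc.1 bc.2, 0) else (bc.1, bc.2 + 1)) (0, 0)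
      let best : Int := max bc.1 bc.2
      -- ans[i][j] = best, then ans[j][i] = best (on the updated matrix)
      let ans1 := PySem.List.pySetD ans i (PySem.List.pySetD (PySem.List.pyGetD ans i []) j best)
      PySem.List.pySetD ans1 j (PySem.List.pySetD (PySem.List.pyGetD ans1 j []) i best)) ans) ans

-- ===== PORT B =====
-- B-side helper: the fused two-pointer walk over two increasing position lists
-- (the while-loop of Source B's `longest`, as the obvious structural recursion on the two lists).
def pvGapMerge (n : Int) : Int → Int → List Int → List Int → Int
  | best, prev, [], [] => max best (n - prev - 1)
  | best, prev, x :: xs, [] =>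
      pvGapMerge n (if x - prev - 1 > best then x - prev - 1 else best) x xs []
  | best, prev, [], y :: ys =>
      pvGapMerge n (if y - prev - 1 > best then y - prev - 1 else best) y [] ys
  | best, prev, x :: xs, y :: ys =>
      if x < y then
        pvGapMerge n (if x - prev - 1 > best then x - prev - 1 else best) x xs (y :: ys)
      else if y < x then
        pvGapMerge n (if y - prev - 1 > best then y - prev - 1 else best) y (x :: xs) ys
      else
        pvGapMerge n (if x - prev - 1 > best then x - prev - 1 else best) x xs ys
  termination_by _ _ a b => a.length + b.length
  decreasing_by all_goals (simp only [List.length_cons]; omega)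

def precompute_longest_without_pairs_py_alt (S : String) : List (List Int) :=
  let K : Int := 26
  let n : Int := PySem.Str.len S
  let pos : List (List Int) := (PySem.List.pyRange 0 K 1).map (fun _ => ([] : List Int))
  let pos := (PySem.List.enumerate S.toList 0).foldl (fun pos p =>
      let k : Int := (p.2.toNat : Int) - 97   -- ord(ch) - ord('a')
      if 0 ≤ k ∧ k < K then
        PySem.List.pySetD pos k (PySem.List.pyGetD pos k [] ++ [p.1])
      else pos) pos
  (PySem.List.pyRange 0 K 1).map (fun i =>
    (PySem.List.pyRange 0 K 1).map (fun j =>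
      pvGapMerge n (-1) (-1) (PySem.List.pyGetD pos i []) (PySem.List.pyGetD pos j [])))

-- ===== PRECONDITION & SPEC =====
def Spec_precompute_longest_without_pairs_py (S : String) (out : List (List Int)) : Prop := out = precompute_longest_without_pairs_py_alt S
instance (S : String) (out : List (List Int)) : Decidable (Spec_precompute_longest_without_pairs_py S out) := by unfold Spec_precompute_longest_without_pairs_py; infer_instance

-- ===== CLAIM (what is proved, stated in full; the proofs are below) =====
def Claim_equal_precompute_longest_without_pairs_py : Prop := ∀ (S : String), Dom_precompute_longest_without_pairs_py S → Spec_precompute_longest_without_pairs_py S (precompute_longest_without_pairs_py S)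

-- ===== LEMMAS AND PROOFS =====

-- A's inner scan, as a recursive function on the character list
def pvScan (pr : Char → Bool) (b c : Int) : List Char → Int
  | [] => max b c
  | ch :: cs => if pr ch then pvScan pr (max b c) 0 cs else pvScan pr b (c + 1) cs

-- single-list gap walk (pvGapMerge once the two lists are merged)
def pvGap1 (n : Int) : Int → Int → List Int → Int
  | best, prev, [] => max best (n - prev - 1)
  | best, prev, x :: xs => pvGap1 n (if x - prev - 1 > best then x - prev - 1 else best) x xs

-- indices (first components) of the entries of e whose character satisfies p
def pvOcc (p : Char → Bool) (e : List (Int × Char)) : List Int :=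
  e.filterMap (fun q => if p q.2 then some q.1 else none)

-- nested-matrix reading used by the fill invariant
def pvGetE (m : List (List Int)) (a b : Nat) : Int := (m.getD a []).getD b 0

-- the double write ans[i][j] = ans[j][i] = v, exactly as in port A's loop body
def pvWrite (m : List (List Int)) (i j : Int) (v : Int) : List (List Int) :=
  let ans1 := PySem.List.pySetD m i (PySem.List.pySetD (PySem.List.pyGetD m i []) j v)
  PySem.List.pySetD ans1 j (PySem.List.pySetD (PySem.List.pyGetD ans1 j []) i v)

-- A's per-pair result, exactly as computed by port A's inner scan
def pvBest (S : String) (i j : Int) : Int :=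
  let forbid1 : Char := Char.ofNat (97 + i).toNat
  let forbid2 : Char := Char.ofNat (97 + j).toNat
  let bc : Int × Int := S.toList.foldl (fun (bc : Int × Int) ch =>
    if ch == forbid1 || ch == forbid2 then (max bc.1 bc.2, 0) else (bc.1, bc.2 + 1)) (0, 0)
  max bc.1 bc.2

def pvWF (m : List (List Int)) : Prop := m.length = 26 ∧ ∀ r ∈ m, r.length = 26

theorem pvA_eq (S : String) : precompute_longest_without_pairs_py S =
    (PySem.List.pyRange 0 26 1).foldl (fun ans i =>
      (PySem.List.pyRange i 26 1).foldl (fun ans j => pvWrite ans i j (pvBest S i j)) ans)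
      ((PySem.List.pyRange 0 26 1).map (fun _ => List.replicate 26 (0 : Int))) := rfl

theorem pvScan_foldl (pr : Char → Bool) (l : List Char) (b c : Int) :
    max (l.foldl (fun (bc : Int × Int) ch =>
      if pr ch then (max bc.1 bc.2, 0) else (bc.1, bc.2 + 1)) (b, c)).1
      (l.foldl (fun (bc : Int × Int) ch =>
      if pr ch then (max bc.1 bc.2, 0) else (bc.1, bc.2 + 1)) (b, c)).2
    = pvScan pr b c l := by
  induction l generalizing b c with
  | nil => simp [pvScan]
  | cons ch cs ih =>
    simp only [List.foldl_cons, pvScan]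
    by_cases h : pr ch <;> simp [h, ih]

theorem pvOcc_lt (p : Char → Bool) (e : List (Int × Char)) (i : Int)
    (he : ∀ z ∈ e, i < z.1) : ∀ x ∈ pvOcc p e, i < x := by
  intro x hx
  obtain ⟨a, ha, hfa⟩ := List.mem_filterMap.mp hx
  by_cases h : p a.2
  · simp [h] at hfa; subst hfa; exact he a ha
  · simp [h] at hfa

theorem pvGapMerge_occ (p q : Char → Bool) (n : Int) (e : List (Int × Char))
    (hp : e.Pairwise (fun a b => a.1 < b.1)) (best prev : Int) :
    pvGapMerge n best prev (pvOcc p e) (pvOcc q e)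
      = pvGap1 n best prev (pvOcc (fun c => p c || q c) e) := by
  induction e generalizing best prev with
  | nil => simp [pvOcc, pvGapMerge, pvGap1]
  | cons z e ih =>
    obtain ⟨hz, hp'⟩ := List.pairwise_cons.mp hp
    have ihs := ih hp'
    by_cases h1 : p z.2 <;> by_cases h2 : q z.2
    · -- both: heads are both z.1
      simp only [pvOcc, List.filterMap_cons, h1, h2, if_true, Bool.or_self]
      simp only [pvOcc] at ihs ⊢
      rw [pvGapMerge]
      simp only [lt_irrefl, if_false]
      rw [pvGap1]
      exact ihs _ _
    · -- p only: head z.1 comes from the left list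
      have hlt := pvOcc_lt q e z.1 (by intro w hw; exact hz w hw)
      simp only [pvOcc, List.filterMap_cons, h1, h2, if_true, Bool.or_false, Bool.false_eq_true, if_false]
      simp only [pvOcc] at ihs hlt ⊢
      cases hB : e.filterMap (fun q_1 => if q q_1.2 = true then some q_1.1 else none) with
      | nil =>
        rw [hB] at ihs
        rw [pvGapMerge, pvGap1]
        exact ihs _ _
      | cons y ys =>
        rw [hB] at ihs hlt
        have hzy : z.1 < y := hlt y (by simp)
        rw [pvGapMerge, if_pos hzy, pvGap1]
        exact ihs _ _
    · -- q only
      have hlt := pvOcc_lt p e z.1 (by intro w hw; exact hz w hw)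
      simp only [pvOcc, List.filterMap_cons, h1, h2, if_true, Bool.false_or, Bool.false_eq_true, if_false]
      simp only [pvOcc] at ihs hlt ⊢
      cases hA : e.filterMap (fun q_1 => if p q_1.2 = true then some q_1.1 else none) with
      | nil =>
        rw [hA] at ihs
        rw [pvGapMerge, pvGap1]
        exact ihs _ _
      | cons y ys =>
        rw [hA] at ihs hlt
        have hzy : z.1 < y := hlt y (by simp)
        rw [pvGapMerge, if_neg (by omega), if_pos hzy, pvGap1]
        exact ihs _ _
    · -- neither
      simp only [pvOcc, List.filterMap_cons, h1, h2]
      simp only [Bool.or_self]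
      exact ihs _ _

theorem pvGap1_scan (pr : Char → Bool) (l : List Char) (t b c : Int) :
    pvGap1 (t + l.length) b (t - c - 1) (pvOcc pr (PySem.List.enumerate l t))
      = pvScan pr b c l := by
  induction l generalizing t b c with
  | nil => simp [pvGap1, pvScan, pvOcc]; omega
  | cons ch cs ih =>
    rw [PySem.List.enumerate_cons]
    by_cases h : pr ch
    · simp only [pvOcc, List.filterMap_cons, h, if_true, pvScan, pvGap1]
      have h1 : t - (t - c - 1) - 1 = c := by ring
      have h2 : (if t - (t - c - 1) - 1 > b then t - (t - c - 1) - 1 else b) = max b c := by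
        rw [h1]; omega
      rw [h2]
      have h3 : t + ((ch :: cs).length : Int) = (t + 1) + (cs.length : Int) := by
        simp; ring
      rw [h3]
      have h4 : t = (t + 1) - 0 - 1 := by ring
      calc pvGap1 ((t+1) + (cs.length : Int)) (max b c) t (pvOcc pr (PySem.List.enumerate cs (t+1)))
          = pvGap1 ((t+1) + (cs.length : Int)) (max b c) ((t+1) - 0 - 1) (pvOcc pr (PySem.List.enumerate cs (t+1))) := by rw [← h4]
        _ = pvScan pr (max b c) 0 cs := ih (t+1) (max b c) 0
    · simp only [pvOcc, List.filterMap_cons, h, Bool.false_eq_true, if_false, pvScan]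
      have h3 : t + ((ch :: cs).length : Int) = (t + 1) + (cs.length : Int) := by
        simp; ring
      have h4 : t - c - 1 = (t + 1) - (c + 1) - 1 := by ring
      rw [h3, h4]
      exact ih (t+1) b (c+1)

theorem pvScan_neg_one (pr : Char → Bool) (l : List Char) (c : Int) (hc : 0 ≤ c) :
    pvScan pr (-1) c l = pvScan pr 0 c l := by
  induction l generalizing c with
  | nil => simp [pvScan]; omega
  | cons ch cs ih =>
    simp only [pvScan]
    by_cases h : pr ch
    · simp only [h, if_true]
      congr 1
      omega
    · simp only [h, Bool.false_eq_true, if_false]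
      exact ih (c + 1) (by omega)

theorem pvPos_spec (e : List (Int × Char)) (m : List (List Int)) (hm : m.length = 26)
    (k : Nat) (hk : k < 26) :
    ((e.foldl (fun pos p =>
        let kk : Int := (p.2.toNat : Int) - 97
        if 0 ≤ kk ∧ kk < 26 then
          PySem.List.pySetD pos kk (PySem.List.pyGetD pos kk [] ++ [p.1])
        else pos) m).getD k [])
      = m.getD k [] ++ pvOcc (fun c => c.toNat == 97 + k) e := by
  induction e generalizing m with
  | nil => simp [pvOcc]
  | cons z e ih =>
    simp only [List.foldl_cons, pvOcc, List.filterMap_cons]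
    by_cases h : 0 ≤ (z.2.toNat : Int) - 97 ∧ (z.2.toNat : Int) - 97 < 26
    · simp only [h, if_true, and_self]
      rw [PySem.List.pySetD_of_nonneg _ _ h.1]
      have hlen : (m.set ((z.2.toNat : Int) - 97).toNat (PySem.List.pyGetD m ((z.2.toNat : Int) - 97) [] ++ [z.1])).length = 26 := by
        simp [hm]
      rw [ih _ hlen]
      have hget : PySem.List.pyGetD m ((z.2.toNat : Int) - 97) [] = m.getD ((z.2.toNat : Int) - 97).toNat [] := by
        rw [PySem.List.pyGetD_of_nonneg _ _ h.1]
      by_cases he : ((z.2.toNat : Int) - 97).toNat = k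
      · have hcode : (z.2.toNat == 97 + k) = true := by
          simp only [beq_iff_eq]; omega
        simp only [hcode, if_true]
        rw [hget, he, List.getD_eq_getElem?_getD, List.getElem?_set_self (by omega)]
        simp [pvOcc, List.getD_eq_getElem?_getD, List.append_assoc]
      · have hcode : (z.2.toNat == 97 + k) = false := by
          simp only [beq_eq_false_iff_ne]; omega
        simp only [hcode, Bool.false_eq_true, if_false]
        rw [List.getD_eq_getElem?_getD, List.getElem?_set_ne (by omega)]
        simp [pvOcc, List.getD_eq_getElem?_getD]
    · simp only [h, if_false]
      rw [ih _ hm]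
      have hcode : (z.2.toNat == 97 + k) = false := by
        simp only [beq_eq_false_iff_ne]; omega
      simp [pvOcc, hcode]

theorem pvChar_eq_ofNat (c : Char) (m : Nat) (h : m < 200) :
    (c = Char.ofNat m) ↔ c.toNat = m := by
  have hv : Nat.isValidChar m := Or.inl (by omega)
  constructor
  · rintro rfl
    simp only [Char.ofNat, dif_pos hv]
    simp [Char.ofNatAux, Char.toNat, UInt32.toNat_ofNatLT]
  · intro hh
    rw [← hh, Char.ofNat_toNat]

theorem pvWrite_getE (m : List (List Int)) (i j : Int) (v : Int)
    (hm : m.length = 26) (hr : ∀ r ∈ m, r.length = 26)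
    (hi : 0 ≤ i ∧ i < 26) (hj : 0 ≤ j ∧ j < 26) (a b : Nat) (ha : a < 26) (hb : b < 26) :
    pvGetE (pvWrite m i j v) a b
      = if (a = i.toNat ∧ b = j.toNat) ∨ (a = j.toNat ∧ b = i.toNat) then v
        else pvGetE m a b := by
  have hrow : ∀ (c : Nat), c < 26 → (m.getD c []).length = 26 := by
    intro c hc
    have : m.getD c [] ∈ m := by
      rw [List.getD_eq_getElem?_getD, List.getElem?_eq_getElem (by omega)]
      simp [List.getElem_mem]
    exact hr _ this
  have hri : (m.getD i.toNat []).length = 26 := hrow _ (by omega)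
  have hrj : (m.getD j.toNat []).length = 26 := hrow _ (by omega)
  unfold pvWrite pvGetE
  rw [PySem.List.pySetD_of_nonneg _ _ hi.1, PySem.List.pySetD_of_nonneg _ _ hj.1,
      PySem.List.pySetD_of_nonneg _ _ hj.1, PySem.List.pySetD_of_nonneg _ _ hi.1,
      PySem.List.pyGetD_of_nonneg _ _ hi.1, PySem.List.pyGetD_of_nonneg _ _ hj.1]
  simp only [List.getD_eq_getElem?_getD, List.getElem?_set, List.length_set, hm]
  split_ifs <;> simp_all [List.getElem_set] <;> omega

theorem pvWrite_WF (m : List (List Int)) (i j : Int) (v : Int)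
    (hWF : pvWF m) (hi : 0 ≤ i ∧ i < 26) (hj : 0 ≤ j ∧ j < 26) :
    pvWF (pvWrite m i j v) := by
  obtain ⟨hm, hr⟩ := hWF
  have hrow : ∀ (c : Nat), c < 26 → (m.getD c []).length = 26 := by
    intro c hc
    have : m.getD c [] ∈ m := by
      rw [List.getD_eq_getElem?_getD, List.getElem?_eq_getElem (by omega)]
      simp [List.getElem_mem]
    exact hr _ this
  unfold pvWrite
  rw [PySem.List.pySetD_of_nonneg _ _ hi.1, PySem.List.pySetD_of_nonneg _ _ hj.1,
      PySem.List.pySetD_of_nonneg _ _ hj.1, PySem.List.pySetD_of_nonneg _ _ hi.1,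
      PySem.List.pyGetD_of_nonneg _ _ hi.1, PySem.List.pyGetD_of_nonneg _ _ hj.1]
  constructor
  · simp [hm]
  · intro r hrm
    rcases List.mem_or_eq_of_mem_set hrm with h | h
    · rcases List.mem_or_eq_of_mem_set h with h' | h'
      · exact hr _ h'
      · subst h'
        rw [List.length_set]
        exact hrow _ (by omega)
    · subst h
      rw [List.length_set]
      rw [List.getD_eq_getElem?_getD, List.getElem?_set, hm]
      by_cases hij : i.toNat = j.toNat
      · rw [if_pos hij, if_pos (by omega)]
        simp only [Option.getD_some, List.length_set]
        exact hrow _ (by omega)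
      · rw [if_neg hij, ← List.getD_eq_getElem?_getD]
        exact hrow _ (by omega)

theorem pvInnerWF (S : String) (i : Int) (hi : 0 ≤ i ∧ i < 26)
    (J : List Int) (hJ : ∀ j ∈ J, i ≤ j ∧ j < 26) (m : List (List Int)) (hWF : pvWF m) :
    pvWF (J.foldl (fun ans j => pvWrite ans i j (pvBest S i j)) m) := by
  induction J generalizing m with
  | nil => exact hWF
  | cons j J ih =>
    simp only [List.foldl_cons]
    have hj := hJ j (List.mem_cons_self ..)
    exact ih (fun x hx => hJ x (List.mem_cons_of_mem _ hx)) _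
      (pvWrite_WF m i j _ hWF hi ⟨by omega, hj.2⟩)

theorem pvInner_getE (S : String) (i : Int) (hi : 0 ≤ i ∧ i < 26)
    (J : List Int) (hJ : ∀ j ∈ J, i ≤ j ∧ j < 26) (m : List (List Int)) (hWF : pvWF m)
    (a b : Nat) (ha : a < 26) (hb : b < 26) :
    pvGetE (J.foldl (fun ans j => pvWrite ans i j (pvBest S i j)) m) a b
      = if (a = i.toNat ∧ (b : Int) ∈ J) ∨ (b = i.toNat ∧ (a : Int) ∈ J)
        then pvBest S i (max (a : Int) (b : Int)) else pvGetE m a b := by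
  induction J generalizing m with
  | nil => simp
  | cons j J ih =>
    have hj := hJ j (List.mem_cons_self ..)
    have hJ' : ∀ x ∈ J, i ≤ x ∧ x < 26 := fun x hx => hJ x (List.mem_cons_of_mem _ hx)
    simp only [List.foldl_cons]
    rw [ih hJ' _ (pvWrite_WF m i j _ hWF hi ⟨by omega, hj.2⟩)]
    rw [pvWrite_getE m i j _ hWF.1 hWF.2 hi ⟨by omega, hj.2⟩ a b ha hb]
    by_cases hcase : (a = i.toNat ∧ (b : Int) ∈ J) ∨ (b = i.toNat ∧ (a : Int) ∈ J)
    · refine Eq.trans (if_pos hcase) (Eq.symm (if_pos ?_))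
      rcases hcase with ⟨h1, h2⟩ | ⟨h1, h2⟩
      · exact Or.inl ⟨h1, List.mem_cons_of_mem _ h2⟩
      · exact Or.inr ⟨h1, List.mem_cons_of_mem _ h2⟩
    · rw [if_neg hcase]
      by_cases hw : (a = i.toNat ∧ b = j.toNat) ∨ (a = j.toNat ∧ b = i.toNat)
      · rw [if_pos hw, if_pos ?side]
        case side =>
          rcases hw with ⟨h1, h2⟩ | ⟨h1, h2⟩
          · exact Or.inl ⟨h1, by rw [List.mem_cons]; left; omega⟩
          · exact Or.inr ⟨h2, by rw [List.mem_cons]; left; omega⟩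
        congr 1
        omega
      · rw [if_neg hw, if_neg ?side2]
        case side2 =>
          intro hc
          rcases hc with ⟨h1, h2⟩ | ⟨h1, h2⟩ <;> rw [List.mem_cons] at h2 <;>
            rcases h2 with h2 | h2
          · exact hw (Or.inl ⟨h1, by omega⟩)
          · exact hcase (Or.inl ⟨h1, h2⟩)
          · exact hw (Or.inr ⟨by omega, h1⟩)
          · exact hcase (Or.inr ⟨h1, h2⟩)

theorem pvOuterWF (S : String) (I : List Int) (hI : ∀ i ∈ I, 0 ≤ i ∧ i < 26)
    (m : List (List Int)) (hWF : pvWF m) :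
    pvWF (I.foldl (fun ans i =>
      (PySem.List.pyRange i 26 1).foldl (fun ans j => pvWrite ans i j (pvBest S i j)) ans) m) := by
  induction I generalizing m with
  | nil => exact hWF
  | cons i I ih =>
    simp only [List.foldl_cons]
    have hi := hI i (List.mem_cons_self ..)
    refine ih (fun x hx => hI x (List.mem_cons_of_mem _ hx)) _ ?_
    exact pvInnerWF S i hi _ (fun j hj => by
      rw [PySem.List.mem_pyRange_one] at hj; exact ⟨hj.1, hj.2⟩) m hWF

theorem pvOuter_getE (S : String) (I : List Int) (hI : ∀ i ∈ I, 0 ≤ i ∧ i < 26)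
    (m : List (List Int)) (hWF : pvWF m)
    (a b : Nat) (ha : a < 26) (hb : b < 26) :
    pvGetE (I.foldl (fun ans i =>
      (PySem.List.pyRange i 26 1).foldl (fun ans j => pvWrite ans i j (pvBest S i j)) ans) m) a b
      = if ((min a b : Nat) : Int) ∈ I then pvBest S (min a b : Nat) (max a b : Nat)
        else pvGetE m a b := by
  induction I generalizing m with
  | nil => simp
  | cons i I ih =>
    have hi := hI i (List.mem_cons_self ..)
    have hI' : ∀ x ∈ I, 0 ≤ x ∧ x < 26 := fun x hx => hI x (List.mem_cons_of_mem _ hx)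
    have hJr : ∀ j ∈ PySem.List.pyRange i 26 1, i ≤ j ∧ j < 26 := fun j hj => by
      rw [PySem.List.mem_pyRange_one] at hj; exact ⟨hj.1, hj.2⟩
    simp only [List.foldl_cons]
    rw [ih hI' _ (pvInnerWF S i hi _ hJr m hWF)]
    rw [pvInner_getE S i hi _ hJr m hWF a b ha hb]
    by_cases hmem : ((min a b : Nat) : Int) ∈ I
    · rw [if_pos hmem, if_pos (List.mem_cons_of_mem _ hmem)]
    · rw [if_neg hmem]
      by_cases hinner : (a = i.toNat ∧ (b : Int) ∈ PySem.List.pyRange i 26 1)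
          ∨ (b = i.toNat ∧ (a : Int) ∈ PySem.List.pyRange i 26 1)
      · rw [if_pos hinner, if_pos ?mem]
        case mem =>
          rw [List.mem_cons]
          left
          rcases hinner with ⟨h1, h2⟩ | ⟨h1, h2⟩ <;> rw [PySem.List.mem_pyRange_one] at h2 <;> omega
        congr 1 <;> rcases hinner with ⟨h1, h2⟩ | ⟨h1, h2⟩ <;>
          rw [PySem.List.mem_pyRange_one] at h2 <;> omega
      · rw [if_neg hinner, if_neg ?mem2]
        case mem2 =>
          rw [List.mem_cons]
          rintro (h | h)
          · exact hinner (by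
              by_cases hab : a ≤ b
              · left
                refine ⟨by omega, ?_⟩
                rw [PySem.List.mem_pyRange_one]
                omega
              · right
                refine ⟨by omega, ?_⟩
                rw [PySem.List.mem_pyRange_one]
                omega)
          · exact hmem h

-- A's matrix, read entrywise
theorem pvA_getE (S : String) (a b : Nat) (ha : a < 26) (hb : b < 26) :
    pvGetE (precompute_longest_without_pairs_py S) a b
      = pvBest S (min a b : Nat) (max a b : Nat) := by
  rw [pvA_eq]
  have hWF0 : pvWF ((PySem.List.pyRange 0 26 1).map (fun _ => List.replicate 26 (0 : Int))) := by
    constructor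
    · simp [PySem.List.length_pyRange_one]
    · intro r hr
      rcases List.mem_map.mp hr with ⟨x, _, rfl⟩
      simp
  rw [pvOuter_getE S _ (fun i hi => by rw [PySem.List.mem_pyRange_one] at hi; exact hi) _ hWF0 a b ha hb]
  rw [if_pos (by rw [PySem.List.mem_pyRange_one]; omega)]

theorem pvA_WF (S : String) : pvWF (precompute_longest_without_pairs_py S) := by
  rw [pvA_eq]
  refine pvOuterWF S _ (fun i hi => by rw [PySem.List.mem_pyRange_one] at hi; exact hi) _ ?_
  constructor
  · simp [PySem.List.length_pyRange_one]
  · intro r hr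
    rcases List.mem_map.mp hr with ⟨x, _, rfl⟩
    simp

-- B's bucket matrix, named for the proofs (definitionally the fold in port B)
def pvPos (S : String) : List (List Int) :=
  (PySem.List.enumerate S.toList 0).foldl (fun pos p =>
      let k : Int := (p.2.toNat : Int) - 97
      if 0 ≤ k ∧ k < 26 then
        PySem.List.pySetD pos k (PySem.List.pyGetD pos k [] ++ [p.1])
      else pos) ((PySem.List.pyRange 0 26 1).map (fun _ => ([] : List Int)))

theorem pvAlt_eq (S : String) : precompute_longest_without_pairs_py_alt S =
    (PySem.List.pyRange 0 26 1).map (fun i =>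
      (PySem.List.pyRange 0 26 1).map (fun j =>
        pvGapMerge (PySem.Str.len S) (-1) (-1)
          (PySem.List.pyGetD (pvPos S) i []) (PySem.List.pyGetD (pvPos S) j []))) := rfl

theorem pvPos_getD (S : String) (k : Nat) (hk : k < 26) :
    (pvPos S).getD k [] = pvOcc (fun c => c.toNat == 97 + k) (PySem.List.enumerate S.toList 0) := by
  unfold pvPos
  rw [pvPos_spec _ _ (by simp [PySem.List.length_pyRange_one]) k hk]
  have hinit : (((PySem.List.pyRange 0 26 1).map (fun _ => ([] : List Int))).getD k []) = [] := by
    rw [List.getD_eq_getElem?_getD]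
    match h : ((PySem.List.pyRange 0 26 1).map (fun _ => ([] : List Int)))[k]? with
    | none => simp
    | some v =>
      have hv := List.mem_of_getElem? h
      rcases List.mem_map.mp hv with ⟨x, _, rfl⟩
      simp [h]
  rw [hinit, List.nil_append]

theorem pvEntry_eq (S : String) (a b : Nat) (ha : a < 26) (hb : b < 26) :
    pvGapMerge (PySem.Str.len S) (-1) (-1)
      (pvOcc (fun c => c.toNat == 97 + a) (PySem.List.enumerate S.toList 0))
      (pvOcc (fun c => c.toNat == 97 + b) (PySem.List.enumerate S.toList 0))
    = pvBest S ((min a b : Nat) : Int) ((max a b : Nat) : Int) := by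
  rw [pvGapMerge_occ _ _ _ _ (PySem.List.pairwise_lt_enumerate _ _)]
  have hn : PySem.Str.len S = 0 + (S.toList.length : Int) := by
    rw [PySem.Str.len_eq]; ring
  have hchain :
      pvGap1 (0 + (S.toList.length : Int)) (-1) (0 - 0 - 1)
        (pvOcc (fun c => (c.toNat == 97 + a) || (c.toNat == 97 + b)) (PySem.List.enumerate S.toList 0))
      = pvScan (fun c => (c.toNat == 97 + a) || (c.toNat == 97 + b)) (-1) 0 S.toList :=
    pvGap1_scan _ S.toList 0 (-1) 0
  rw [show ((0:Int) - 0 - 1) = -1 from by ring] at hchain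
  rw [hn, hchain, pvScan_neg_one _ _ _ (by omega)]
  -- now rewrite pvBest into a pvScan with the same predicate
  have htn : ∀ (x : Nat), ((97 + (x : Int)).toNat) = 97 + x := by intro x; omega
  unfold pvBest
  rw [pvScan_foldl]
  have hpred : (fun ch => ch == Char.ofNat (97 + ((min a b : Nat) : Int)).toNat
        || ch == Char.ofNat (97 + ((max a b : Nat) : Int)).toNat)
      = (fun c => (c.toNat == 97 + a) || (c.toNat == 97 + b)) := by
    funext ch
    rw [htn, htn]
    have e1 : ∀ (x : Nat), x < 26 → (ch == Char.ofNat (97 + x)) = (ch.toNat == 97 + x) := by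
      intro x hx
      rw [Bool.eq_iff_iff, beq_iff_eq, beq_iff_eq]
      exact pvChar_eq_ofNat ch (97 + x) (by omega)
    rw [e1 _ (by omega), e1 _ (by omega)]
    rcases Nat.le_total a b with h | h
    · rw [Nat.min_eq_left h, Nat.max_eq_right h]
    · rw [Nat.min_eq_right h, Nat.max_eq_left h, Bool.or_comm]
  rw [hpred]

theorem pvGetE_elem (m : List (List Int)) (a b : Nat) (h1 : a < m.length)
    (hb1 : b < (m[a]'h1).length) : (m[a]'h1)[b]'hb1 = pvGetE m a b := by
  unfold pvGetE
  rw [List.getD_eq_getElem _ [] h1, List.getD_eq_getElem _ 0 hb1]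

-- ===== VERDICT (by name: the statement is the Claim_ definition above) =====
theorem precompute_longest_without_pairs_py_spec : Claim_equal_precompute_longest_without_pairs_py := by
  intro S _
  unfold Spec_precompute_longest_without_pairs_py
  have hWF := pvA_WF S
  rw [pvAlt_eq]
  apply List.ext_getElem
  · rw [hWF.1]
    simp [PySem.List.length_pyRange_one]
  intro a h1 h2
  have ha26 : a < 26 := by rw [hWF.1] at h1; exact h1
  apply List.ext_getElem
  · rw [hWF.2 _ (List.getElem_mem h1)]
    simp [PySem.List.length_pyRange_one]
  intro b hb1 hb2
  have hb26 : b < 26 := by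
    rw [hWF.2 _ (List.getElem_mem h1)] at hb1
    exact hb1
  -- left side: read through pvGetE and the fill invariant
  rw [pvGetE_elem _ a b h1 hb1, pvA_getE S a b ha26 hb26]
  -- right side: the map/pyRange comprehension, bucket characterisation, and the merge lemmas
  rw [← pvEntry_eq S a b ha26 hb26]
  simp only [List.getElem_map, PySem.List.getElem_pyRange_one]
  rw [show (0:Int) + (a:Int) = ((a : Nat) : Int) from by ring,
      show (0:Int) + (b:Int) = ((b : Nat) : Int) from by ring,
      PySem.List.pyGetD_natCast, PySem.List.pyGetD_natCast,
      pvPos_getD S a ha26, pvPos_getD S b hb26]
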